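-- pv_equiv track=rewrite | github.com/JosefPeck/dailyprogrammer | challenges/377 [Easy] Axis-aligned crate packing/__main__.py | fit3
-- ===== SOURCE A (Python) =====
-- def fit3(
-- 	X: int, Y: int, Z: int, x: int, y: int, z: int, rotated_already: bool = False
-- ) -> int:
-- 	# Doesn't seem to work. TODO.
-- 	rot_list_box: tuple = (X, Y, Z)
-- 	rot_list: tuple = (x, y, z)
-- 	rotation_index = 0
-- 	results = []
-- 	for i in range(3):
-- 		x_boxes = rot_list_box[rotation_index % len(rot_list_box)] // \
-- 			rot_list[rotation_index % len(rot_list)]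
-- 		y_boxes = rot_list_box[(rotation_index + 1) % len(rot_list_box)] // \
-- 			rot_list[(rotation_index + 1) % len(rot_list)]
-- 		z_boxes = rot_list_box[(rotation_index + 2) % len(rot_list_box)] // \
-- 			rot_list[(rotation_index + 2) % len(rot_list)]
-- 		results.append(
-- 			x_boxes * y_boxes * z_boxes
-- 		)
-- 		rotation_index += 1
-- 	return max(results)
-- ===== SOURCE B (Python) =====
-- def fit3(
-- 	X: int, Y: int, Z: int, x: int, y: int, z: int, rotated_already: bool = False
-- ) -> int:
-- 	# All three rotations of A multiply the same three quotients, so the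
-- 	# maximum is just the single product.
-- 	return (X // x) * (Y // y) * (Z // z)
-- ===== Notes on version B (the rewrite author's own statement) =====
-- stated objective: simpler
-- what changed: Replaced the 3-iteration rotation loop, result list and max() with the single closed-form product (X//x)*(Y//y)*(Z//z), since each rotation shifts box dims and divisors together and multiplication commutes.
import Mathlib
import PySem

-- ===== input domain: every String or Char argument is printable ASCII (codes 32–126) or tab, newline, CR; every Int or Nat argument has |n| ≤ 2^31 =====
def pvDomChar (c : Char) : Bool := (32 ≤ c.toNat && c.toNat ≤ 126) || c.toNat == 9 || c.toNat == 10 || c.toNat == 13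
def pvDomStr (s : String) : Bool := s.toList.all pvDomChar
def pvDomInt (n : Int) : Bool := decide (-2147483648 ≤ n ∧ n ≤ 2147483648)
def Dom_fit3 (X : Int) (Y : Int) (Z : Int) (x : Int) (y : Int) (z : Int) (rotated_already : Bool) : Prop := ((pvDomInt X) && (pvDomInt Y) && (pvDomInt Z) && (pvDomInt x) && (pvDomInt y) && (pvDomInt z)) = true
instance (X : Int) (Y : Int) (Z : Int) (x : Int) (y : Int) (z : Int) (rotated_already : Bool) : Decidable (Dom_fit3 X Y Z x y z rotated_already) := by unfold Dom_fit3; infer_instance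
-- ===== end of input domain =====

-- B replaces A's three-rotation loop + max() with the single closed-form product
-- (X//x)*(Y//y)*(Z//z): each rotation shifts dividends and divisors together, so
-- by commutativity all three results are equal (objective: simpler).

-- ===== PORT A =====
-- Literal port of A: rotation loop over range(3), list of results, max at the end.
-- max(results) is ported as max? …|>.getD 0; the list always has 3 elements, so the
-- default is never used.
def fit3 (X : Int) (Y : Int) (Z : Int) (x : Int) (y : Int) (z : Int) (rotated_already : Bool) : Int :=
  let rot_list_box : List Int := [X, Y, Z]
  let rot_list : List Int := [x, y, z]
  let st := (PySem.List.pyRange 0 3 1).foldl (fun (st : Int × List Int) _i =>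
      let rotation_index := st.1
      let results := st.2
      let x_boxes := PySem.Int.floordiv
        (PySem.List.pyGetD rot_list_box (PySem.Int.mod rotation_index (rot_list_box.length : Int)) 0)
        (PySem.List.pyGetD rot_list (PySem.Int.mod rotation_index (rot_list.length : Int)) 0)
      let y_boxes := PySem.Int.floordiv
        (PySem.List.pyGetD rot_list_box (PySem.Int.mod (rotation_index + 1) (rot_list_box.length : Int)) 0)
        (PySem.List.pyGetD rot_list (PySem.Int.mod (rotation_index + 1) (rot_list.length : Int)) 0)
      let z_boxes := PySem.Int.floordiv
        (PySem.List.pyGetD rot_list_box (PySem.Int.mod (rotation_index + 2) (rot_list_box.length : Int)) 0)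
        (PySem.List.pyGetD rot_list (PySem.Int.mod (rotation_index + 2) (rot_list.length : Int)) 0)
      (rotation_index + 1, results ++ [x_boxes * y_boxes * z_boxes]))
    (0, ([] : List Int))
  (PySem.List.max? st.2 (fun v => v)).getD 0

-- ===== PORT B =====
-- B: single closed-form product; no loop, no list, no max.
def fit3_alt (X : Int) (Y : Int) (Z : Int) (x : Int) (y : Int) (z : Int) (rotated_already : Bool) : Int :=
  PySem.Int.floordiv X x * PySem.Int.floordiv Y y * PySem.Int.floordiv Z z

-- ===== PRECONDITION & SPEC =====
-- Pre_ excludes only zero divisors, on which Python's // raises ZeroDivisionError.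
def Pre_fit3 (X : Int) (Y : Int) (Z : Int) (x : Int) (y : Int) (z : Int) (rotated_already : Bool) : Prop :=
  x ≠ 0 ∧ y ≠ 0 ∧ z ≠ 0
instance (X : Int) (Y : Int) (Z : Int) (x : Int) (y : Int) (z : Int) (rotated_already : Bool) : Decidable (Pre_fit3 X Y Z x y z rotated_already) := by unfold Pre_fit3; infer_instance
def pvWitness_fit3 : Int × Int × Int × Int × Int × Int × Bool := (10, 9, 8, 2, 3, 4, false)

def Spec_fit3 (X : Int) (Y : Int) (Z : Int) (x : Int) (y : Int) (z : Int) (rotated_already : Bool) (out : Int) : Prop := out = fit3_alt X Y Z x y z rotated_already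
instance (X : Int) (Y : Int) (Z : Int) (x : Int) (y : Int) (z : Int) (rotated_already : Bool) (out : Int) : Decidable (Spec_fit3 X Y Z x y z rotated_already out) := by unfold Spec_fit3; infer_instance

-- ===== CLAIM (what is proved, stated in full; the proofs are below) =====
def Claim_equal_fit3 : Prop := ∀ (X : Int) (Y : Int) (Z : Int) (x : Int) (y : Int) (z : Int) (rotated_already : Bool), Dom_fit3 X Y Z x y z rotated_already → Pre_fit3 X Y Z x y z rotated_already → Spec_fit3 X Y Z x y z rotated_already (fit3 X Y Z x y z rotated_already)

-- ===== LEMMAS AND PROOFS =====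

-- ===== VERDICT (by name: the statement is the Claim_ definition above) =====
theorem fit3_spec : Claim_equal_fit3 := by
  intro X Y Z x y z r _ _
  unfold Spec_fit3 fit3 fit3_alt
  have h1 : PySem.List.pyRange 0 3 1 = [0, 1, 2] := by decide
  rw [h1]
  simp [PySem.List.max?, PySem.Int.mod, PySem.List.pyGetD, PySem.List.pyIdx?, PySem.List.pyGet?]
  have h2 : PySem.Int.floordiv Y y * PySem.Int.floordiv Z z * PySem.Int.floordiv X x
      = PySem.Int.floordiv X x * PySem.Int.floordiv Y y * PySem.Int.floordiv Z z := by ring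
  have h3 : PySem.Int.floordiv Z z * PySem.Int.floordiv X x * PySem.Int.floordiv Y y
      = PySem.Int.floordiv X x * PySem.Int.floordiv Y y * PySem.Int.floordiv Z z := by ring
  rw [h2, h3, if_neg (lt_irrefl _)]
  simp
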